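/- GENERATED by mk_final_copies.py from the proof of the farm's unit `start_decoder.C8a` (farm:start_decoder.C8a.1: Proof.lean) as the
   re-elaboration sweep compiled it — do not edit. -/
import Vorbis.Spec.Units.start_decoder_C8a
import Vorbis.Spec.Worked.start_decoder_C8a_Lemmas

/-- Segment C8a of `start_decoder`: the check and test of `c->sorted_entries`, then the join (`SE = 0`) or `call setup_malloc` for the
`sorted_codewords` block, both arms (`Lemmas.lean`: `c8a_walk`). -/
theorem Vorbis.Spec.Worked.start_decoder_C8a_ok : Vorbis.Spec.start_decoder_C8a.Statement := by
  intro Lay hLay μ hμ u₀ hcode h4 hmalloc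
  exact Vorbis.Spec.start_decoder_C8a.c8a_walk Lay hLay μ hμ u₀ hcode h4 hmalloc
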